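-- pv_equiv track=rewrite | github.com/bighorse1911/Generic-Data-Application | src/gui_kit/column_chooser.py | normalize_column_preferences
-- ===== SOURCE A (Python) =====
-- def normalize_column_preferences(
--     columns: list[str],
--     visible_columns: list[str] | None = None,
-- ) -> list[tuple[str, bool]]:
--     """
--     Normalize columns + visibility into ordered (column, visible) tuples.
--
--     - Preserves canonical column order for any columns not explicitly reordered.
--     - Filters out unknown visible columns.
--     """
--
--     canonical: list[str] = []
--     seen: set[str] = set()
--     for name in columns:
--         value = str(name).strip()
--         if value == "" or value in seen:
--             continue
--         canonical.append(value)
--         seen.add(value)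
--
--     if not canonical:
--         return []
--
--     if visible_columns is None:
--         return [(name, True) for name in canonical]
--
--     visible_order: list[str] = []
--     for name in visible_columns:
--         value = str(name).strip()
--         if value in seen and value not in visible_order:
--             visible_order.append(value)
--
--     ordered = list(visible_order)
--     ordered.extend([name for name in canonical if name not in visible_order])
--     visible_set = set(visible_order)
--     return [(name, name in visible_set) for name in ordered]
-- ===== SOURCE B (Python) =====
-- def normalize_column_preferences(
--     columns: list[str],
--     visible_columns: list[str] | None = None,
-- ) -> list[tuple[str, bool]]:
--     order: dict[str, None] = {}
--     for name in columns:
--         value = str(name).strip()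
--         if value:
--             order.setdefault(value, None)
--     canonical = list(order)
--
--     if visible_columns is None:
--         return [(name, True) for name in canonical]
--
--     rank: dict[str, int] = {}
--     for name in visible_columns:
--         value = str(name).strip()
--         if value in order:
--             rank.setdefault(value, len(rank))
--
--     k = len(rank)
--     key = {name: rank.get(name, k + i) for i, name in enumerate(canonical)}
--     ordered = sorted(canonical, key=key.__getitem__)
--     return [(name, name in rank) for name in ordered]
-- ===== Notes on version B (the rewrite author's own statement) =====
-- stated objective: faster
-- what changed: Dedup is done with one insertion-ordered dict (setdefault) instead of a list plus a set with a membership append loop, the empty-canonical early return disappears, visible filtering builds a first-occurrence rank dict instead of repeatedly scanning visible_order, and the final ordering is one stable sort of canonical keyed by rank (non-visible names keyed past all ranks) instead of append-plus-linear-filter.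
import Mathlib
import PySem

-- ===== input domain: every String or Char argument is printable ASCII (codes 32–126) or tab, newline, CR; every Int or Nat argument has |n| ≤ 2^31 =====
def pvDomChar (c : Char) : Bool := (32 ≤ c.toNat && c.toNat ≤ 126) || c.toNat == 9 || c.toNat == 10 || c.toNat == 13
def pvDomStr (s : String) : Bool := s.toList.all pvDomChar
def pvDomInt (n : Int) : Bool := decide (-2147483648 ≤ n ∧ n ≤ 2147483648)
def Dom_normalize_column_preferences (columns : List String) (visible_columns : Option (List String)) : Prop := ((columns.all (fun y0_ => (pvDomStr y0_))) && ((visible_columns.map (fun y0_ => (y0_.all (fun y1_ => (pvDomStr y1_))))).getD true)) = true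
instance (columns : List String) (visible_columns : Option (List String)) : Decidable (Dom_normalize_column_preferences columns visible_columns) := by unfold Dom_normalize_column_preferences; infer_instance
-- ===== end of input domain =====

-- B dedups with one insertion-ordered dict instead of a list+set append loop, drops the empty
-- early return, builds a first-occurrence rank dict instead of rescanning visible_order, and
-- orders by one stable sort of canonical keyed by rank; same return value, asymptotically faster.

-- ===== PORT A =====
def normalize_column_preferences (columns : List String) (visible_columns : Option (List String)) : List (String × Bool) :=
  -- canonical/seen loop: acc = (canonical, seen)
  let cs := columns.foldl (fun (acc : List String × PySem.Set String) name =>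
      let value := PySem.Str.strip name
      if value = "" ∨ PySem.Set.contains acc.2 value then acc
      else (acc.1 ++ [value], PySem.Set.add acc.2 value)) ([], PySem.Set.empty)
  if cs.1 = [] then []
  else
    match visible_columns with
    | none => cs.1.map (fun name => (name, true))
    | some vcs =>
      let visible_order := vcs.foldl (fun (vo : List String) name =>
          let value := PySem.Str.strip name
          if PySem.Set.contains cs.2 value ∧ value ∉ vo then vo ++ [value] else vo) []
      -- ordered = list(visible_order); ordered.extend([name for name in canonical if name not in visible_order])
      let ordered := visible_order ++ cs.1.filter (fun name => decide (name ∉ visible_order))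
      let visible_set := PySem.Set.ofList visible_order
      ordered.map (fun name => (name, PySem.Set.contains visible_set name))

-- ===== PORT B =====
def normalize_column_preferences_alt (columns : List String) (visible_columns : Option (List String)) : List (String × Bool) :=
  -- order.setdefault(value, None) for non-empty stripped values; canonical = list(order)
  let order := columns.foldl (fun (d : PySem.Dict String (Option Unit)) name =>
      let value := PySem.Str.strip name
      if value = "" then d else d.setdefault value none) PySem.Dict.empty
  let canonical := order.keys
  match visible_columns with
  | none => canonical.map (fun name => (name, true))
  | some vcs =>
    -- rank.setdefault(value, len(rank)) for valid visible names
    let rank := vcs.foldl (fun (d : PySem.Dict String Int) name =>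
        let value := PySem.Str.strip name
        if order.contains value then d.setdefault value (d.size : Int) else d) PySem.Dict.empty
    -- key = {name: rank.get(name, k + i) for i, name in enumerate(canonical)}
    let keyd := (PySem.List.enumerate canonical 0).foldl (fun (d : PySem.Dict String Int) p =>
        d.insert p.2 (rank.getD p.2 ((rank.size : Int) + p.1))) PySem.Dict.empty
    -- ordered = sorted(canonical, key=key.__getitem__)
    let ordered := PySem.List.sorted canonical (fun name => keyd.getD name 0) false
    ordered.map (fun name => (name, rank.contains name))

-- ===== PRECONDITION & SPEC =====
def Spec_normalize_column_preferences (columns : List String) (visible_columns : Option (List String)) (out : List (String × Bool)) : Prop := out = normalize_column_preferences_alt columns visible_columns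
instance (columns : List String) (visible_columns : Option (List String)) (out : List (String × Bool)) : Decidable (Spec_normalize_column_preferences columns visible_columns out) := by unfold Spec_normalize_column_preferences; infer_instance

-- ===== CLAIM (what is proved, stated in full; the proofs are below) =====
def Claim_equal_normalize_column_preferences : Prop := ∀ (columns : List String) (visible_columns : Option (List String)), Dom_normalize_column_preferences columns visible_columns → Spec_normalize_column_preferences columns visible_columns (normalize_column_preferences columns visible_columns)

-- ===== LEMMAS AND PROOFS =====

def rdict (vo : List String) : PySem.Dict String Int :=
  PySem.Dict.mk ((PySem.List.enumerate vo 0).map (fun p => (p.2, p.1)))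

lemma rdict_keys (vo : List String) : (rdict vo).keys = vo := by
  simp [rdict, PySem.Dict.keys_mk, List.map_map, Function.comp_def, PySem.List.map_snd_enumerate]

lemma rdict_contains (vo : List String) (v : String) :
    (rdict vo).contains v = decide (v ∈ vo) := by
  rw [PySem.Dict.contains_eq_decide_mem_keys, rdict_keys]

lemma rdict_size (vo : List String) : (rdict vo).size = vo.length := by
  simp [rdict, PySem.Dict.size, PySem.List.length_enumerate]

lemma rdict_insert (vo : List String) (v : String) (hv : v ∉ vo) :
    (rdict vo).insert v ((rdict vo).size : Int) = rdict (vo ++ [v]) := by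
  apply PySem.Dict.ext
  rw [PySem.Dict.items_insert_of_not_contains _ _ (by simp [rdict_contains, hv]), rdict_size]
  simp [rdict, PySem.List.enumerate_append, PySem.List.enumerate_cons]

lemma rdict_getD (vo : List String) (hnd : vo.Nodup) (v : String) (hv : v ∈ vo) (d0 : Int) :
    (rdict vo).getD v d0 = (vo.idxOf v : Int) := by
  apply PySem.Dict.getD_of_mem_items
  · show (v, (vo.idxOf v : Int)) ∈ (PySem.List.enumerate vo 0).map (fun p => (p.2, p.1))
    refine List.mem_map.mpr ⟨((vo.idxOf v : Int), v), ?_, rfl⟩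
    rw [PySem.List.mem_enumerate_iff]
    exact ⟨vo.idxOf v, List.idxOf_lt_length_of_mem hv, by
      simp [List.getElem_idxOf (List.idxOf_lt_length_of_mem hv)]⟩
  · rw [rdict_keys]; exact hnd

-- B's dedup dict has exactly A's canonical list as its key sequence.
lemma dedup_keys (cols : List String) : ∀ (d : PySem.Dict String (Option Unit))
    (c : List String) (s : PySem.Set String), d.keys = c → (∀ v, v ∈ s ↔ v ∈ c) →
    (cols.foldl (fun (d : PySem.Dict String (Option Unit)) name =>
        let value := PySem.Str.strip name
        if value = "" then d else d.setdefault value none) d).keys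
    = (cols.foldl (fun (acc : List String × PySem.Set String) name =>
        let value := PySem.Str.strip name
        if value = "" ∨ PySem.Set.contains acc.2 value then acc
        else (acc.1 ++ [value], PySem.Set.add acc.2 value)) (c, s)).1 := by
  induction cols with
  | nil => intro d c s hk hs; exact hk
  | cons name rest ih =>
    intro d c s hk hs
    simp only [List.foldl_cons]
    by_cases he : PySem.Str.strip name = ""
    · rw [if_pos he, if_pos (Or.inl he)]
      exact ih d c s hk hs
    · rw [if_neg he]
      by_cases hm : PySem.Str.strip name ∈ s
      · rw [if_pos (Or.inr (by simpa using hm))]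
        have hcont : d.contains (PySem.Str.strip name) = true := by
          rw [PySem.Dict.contains_eq_decide_mem_keys, hk]
          simpa using (hs _).mp hm
        rw [PySem.Dict.setdefault_of_contains _ _ hcont]
        exact ih d c s hk hs
      · rw [if_neg (by simp [he, hm])]
        have hcont : d.contains (PySem.Str.strip name) = false := by
          rw [PySem.Dict.contains_eq_decide_mem_keys, hk]
          simpa using fun h => hm ((hs _).mpr h)
        rw [PySem.Dict.setdefault_of_not_contains _ _ hcont]
        refine ih _ (c ++ [PySem.Str.strip name]) _ ?_ ?_
        · rw [PySem.Dict.keys_insert_of_not_contains _ _ hcont, hk]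
        · intro v
          show v ∈ PySem.Set.add s _ ↔ _
          unfold PySem.Set.add
          rw [if_neg (by simpa using hm)]
          simp [hs v]

-- B's rank loop is A's visible_order loop, read as a rank dict.
lemma rank_loop (order : PySem.Dict String (Option Unit)) (seen : PySem.Set String)
    (hc : ∀ v, order.contains v = PySem.Set.contains seen v) (vcs : List String) :
    ∀ (vo : List String),
    vcs.foldl (fun (d : PySem.Dict String Int) name =>
        let value := PySem.Str.strip name
        if order.contains value then d.setdefault value (d.size : Int) else d) (rdict vo)
    = rdict (vcs.foldl (fun (vo : List String) name =>
        let value := PySem.Str.strip name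
        if PySem.Set.contains seen value ∧ value ∉ vo then vo ++ [value] else vo) vo) := by
  induction vcs with
  | nil => intro vo; rfl
  | cons name rest ih =>
    intro vo
    simp only [List.foldl_cons]
    by_cases h1 : PySem.Str.strip name ∈ seen
    · rw [if_pos (by rw [hc]; simpa using h1)]
      by_cases h2 : PySem.Str.strip name ∈ vo
      · rw [PySem.Dict.setdefault_of_contains _ _ (by simp [rdict_contains, h2]),
          if_neg (by simp [h2]), ih]
      · rw [PySem.Dict.setdefault_of_not_contains _ _ (by simp [rdict_contains, h2]),
          rdict_insert _ _ h2, if_pos (by simp [h1, h2]), ih]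
    · rw [if_neg (by rw [hc]; simpa using h1), if_neg (by simp [h1]), ih]

lemma canon_inv (cols : List String) : ∀ (c : List String) (s : PySem.Set String),
    c.Nodup → (∀ v, v ∈ s ↔ v ∈ c) →
    (cols.foldl (fun (acc : List String × PySem.Set String) name =>
        let value := PySem.Str.strip name
        if value = "" ∨ PySem.Set.contains acc.2 value then acc
        else (acc.1 ++ [value], PySem.Set.add acc.2 value)) (c, s)).1.Nodup ∧
    (∀ v, v ∈ (cols.foldl (fun (acc : List String × PySem.Set String) name =>
        let value := PySem.Str.strip name
        if value = "" ∨ PySem.Set.contains acc.2 value then acc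
        else (acc.1 ++ [value], PySem.Set.add acc.2 value)) (c, s)).2
      ↔ v ∈ (cols.foldl (fun (acc : List String × PySem.Set String) name =>
        let value := PySem.Str.strip name
        if value = "" ∨ PySem.Set.contains acc.2 value then acc
        else (acc.1 ++ [value], PySem.Set.add acc.2 value)) (c, s)).1) := by
  induction cols with
  | nil => intro c s hnd hs; exact ⟨hnd, hs⟩
  | cons name rest ih =>
    intro c s hnd hs
    simp only [List.foldl_cons]
    by_cases hcond : PySem.Str.strip name = "" ∨ PySem.Str.strip name ∈ s
    · rw [if_pos (by simpa using hcond)]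
      exact ih c s hnd hs
    · rw [if_neg (by simpa using hcond)]
      rw [not_or] at hcond
      have hns : PySem.Str.strip name ∉ c := fun h => hcond.2 ((hs _).mpr h)
      refine ih _ _ ?_ ?_
      · simp only [List.nodup_append, List.nodup_singleton]
        refine ⟨hnd, trivial, fun a ha b hb => ?_⟩
        simp only [List.mem_singleton] at hb
        subst hb
        exact fun h => hns (h ▸ ha)
      · intro v
        show v ∈ PySem.Set.add s _ ↔ _
        unfold PySem.Set.add
        rw [if_neg (by simpa using hcond.2)]
        simp [hs v]

lemma vo_inv (seen : PySem.Set String) (canon : List String)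
    (hseen : ∀ v, v ∈ seen ↔ v ∈ canon) (vcs : List String) :
    ∀ (vo : List String), vo.Nodup → (∀ v ∈ vo, v ∈ canon) →
    (vcs.foldl (fun (vo : List String) name =>
        let value := PySem.Str.strip name
        if PySem.Set.contains seen value ∧ value ∉ vo then vo ++ [value] else vo) vo).Nodup ∧
    (∀ v ∈ (vcs.foldl (fun (vo : List String) name =>
        let value := PySem.Str.strip name
        if PySem.Set.contains seen value ∧ value ∉ vo then vo ++ [value] else vo) vo), v ∈ canon) := by
  induction vcs with
  | nil => intro vo h1 h2; exact ⟨h1, h2⟩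
  | cons name rest ih =>
    intro vo h1 h2
    simp only [List.foldl_cons]
    by_cases hcond : PySem.Str.strip name ∈ seen ∧ PySem.Str.strip name ∉ vo
    · rw [if_pos (by simpa using hcond)]
      refine ih _ ?_ ?_
      · simp only [List.nodup_append, List.nodup_singleton]
        refine ⟨h1, trivial, fun a ha b hb => ?_⟩
        simp only [List.mem_singleton] at hb
        subst hb
        exact fun h => hcond.2 (h ▸ ha)
      · intro v hv
        rcases List.mem_append.mp hv with h | h
        · exact h2 v h
        · simp at h; subst h; exact (hseen _).mp hcond.1
    · rw [if_neg (by simpa using hcond)]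
      exact ih _ h1 h2

lemma keyd_getD (canon : List String) (rank : PySem.Dict String Int) (k : Int)
    (hnd : canon.Nodup) (name : String) (h : name ∈ canon) (d0 : Int) :
    ((PySem.List.enumerate canon 0).foldl (fun (d : PySem.Dict String Int) p =>
        d.insert p.2 (rank.getD p.2 (k + p.1))) PySem.Dict.empty).getD name d0
      = rank.getD name (k + (canon.idxOf name : Int)) := by
  have hitems := PySem.Dict.items_foldl_insert_fresh (PySem.List.enumerate canon 0)
    (fun p => p.2) (fun p => rank.getD p.2 (k + p.1)) PySem.Dict.empty
    (fun a _ => PySem.Dict.contains_empty _)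
    (by rw [PySem.List.map_snd_enumerate]; exact hnd)
  apply PySem.Dict.getD_of_mem_items
  · rw [hitems]
    refine List.mem_append_right _ (List.mem_map.mpr ⟨((canon.idxOf name : Int) + 0, name), ?_, by simp⟩)
    rw [PySem.List.mem_enumerate_iff]
    exact ⟨canon.idxOf name, List.idxOf_lt_length_of_mem h, by
      simp [List.getElem_idxOf (List.idxOf_lt_length_of_mem h)]⟩
  · exact PySem.Dict.nodup_keys_foldl_insert_key _ _ _ _ PySem.Dict.nodup_keys_empty

lemma main_sorted (canon vo : List String) (hndc : canon.Nodup) (hndv : vo.Nodup)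
    (hsub : ∀ v ∈ vo, v ∈ canon) :
    PySem.List.sorted canon
      (fun name => ((PySem.List.enumerate canon 0).foldl (fun (d : PySem.Dict String Int) p =>
          d.insert p.2 ((rdict vo).getD p.2 (((rdict vo).size : Int) + p.1))) PySem.Dict.empty).getD name 0)
      false
    = vo ++ canon.filter (fun name => decide (name ∉ vo)) := by
  set κ : String → Int := fun name => ((PySem.List.enumerate canon 0).foldl
      (fun (d : PySem.Dict String Int) p =>
        d.insert p.2 ((rdict vo).getD p.2 (((rdict vo).size : Int) + p.1))) PySem.Dict.empty).getD name 0
    with hκ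
  have hκmem : ∀ name ∈ canon, κ name
      = (rdict vo).getD name (((rdict vo).size : Int) + (canon.idxOf name : Int)) := by
    intro name h
    rw [hκ]
    exact keyd_getD canon (rdict vo) _ hndc name h 0
  have hvo : ∀ a ∈ vo, κ a = (vo.idxOf a : Int) := by
    intro a ha
    rw [hκmem a (hsub a ha)]
    exact rdict_getD vo hndv a ha _
  have hnv : ∀ a ∈ canon, a ∉ vo → κ a = (vo.length : Int) + (canon.idxOf a : Int) := by
    intro a ha hna
    rw [hκmem a ha, PySem.Dict.getD_of_not_contains _ _ (by simp [rdict_contains, hna]), rdict_size]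
  apply PySem.List.sorted_eq_of_perm_of_pairwise_lt
  · -- permutation
    have h1 : vo.Perm (canon.filter (fun x => decide (x ∈ vo))) := by
      refine (List.perm_ext_iff_of_nodup hndv (hndc.filter _)).mpr fun x => ?_
      simp only [List.mem_filter, decide_eq_true_eq]
      exact ⟨fun hx => ⟨hsub x hx, hx⟩, And.right⟩
    have h2 : (canon.filter (fun x => decide (x ∈ vo))
        ++ canon.filter (fun name => decide (name ∉ vo))).Perm canon := by
      have : (fun name : String => decide (name ∉ vo))
          = (fun x : String => !decide (x ∈ vo)) := by
        funext x; simp [decide_not]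
      rw [this]
      exact List.filter_append_perm _ canon
    exact ((h1.append_right _).trans h2)
  · -- pairwise strictly increasing key
    rw [List.pairwise_append]
    refine ⟨?_, ?_, ?_⟩
    · refine List.pairwise_iff_getElem.mpr fun i j hi hj hij => ?_
      rw [hvo _ (List.getElem_mem hi), hvo _ (List.getElem_mem hj),
        List.Nodup.idxOf_getElem hndv i hi, List.Nodup.idxOf_getElem hndv j hj]
      exact_mod_cast hij
    · have base : canon.Pairwise (fun a b => (canon.idxOf a : Int) < (canon.idxOf b : Int)) := by
        refine List.pairwise_iff_getElem.mpr fun i j hi hj hij => ?_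
        rw [List.Nodup.idxOf_getElem hndc i hi, List.Nodup.idxOf_getElem hndc j hj]
        exact_mod_cast hij
      have hf := base.sublist (List.filter_sublist (p := fun name : String => decide (name ∉ vo)) (l := canon))
      refine hf.imp_of_mem ?_
      intro a b ha hb hlt
      have ha' := List.mem_filter.mp ha
      have hb' := List.mem_filter.mp hb
      rw [hnv a ha'.1 (by simpa using ha'.2), hnv b hb'.1 (by simpa using hb'.2)]
      omega
    · intro a ha b hb
      have hb' := List.mem_filter.mp hb
      rw [hvo a ha, hnv b hb'.1 (by simpa using hb'.2)]
      have := List.idxOf_lt_length_of_mem ha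
      omega

-- ===== VERDICT (by name: the statement is the Claim_ definition above) =====
theorem normalize_column_preferences_spec : Claim_equal_normalize_column_preferences := by
  intro columns visible_columns _
  unfold Spec_normalize_column_preferences
  unfold normalize_column_preferences normalize_column_preferences_alt
  obtain ⟨hnd, hmem⟩ := canon_inv columns [] PySem.Set.empty List.nodup_nil (by intro v; rfl)
  set cs := columns.foldl (fun (acc : List String × PySem.Set String) name =>
      let value := PySem.Str.strip name
      if value = "" ∨ PySem.Set.contains acc.2 value then acc
      else (acc.1 ++ [value], PySem.Set.add acc.2 value)) ([], PySem.Set.empty) with hcs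
  have hkeys : (columns.foldl (fun (d : PySem.Dict String (Option Unit)) name =>
      let value := PySem.Str.strip name
      if value = "" then d else d.setdefault value none) PySem.Dict.empty).keys = cs.1 := by
    rw [hcs]
    exact dedup_keys columns PySem.Dict.empty [] PySem.Set.empty (by simp) (by intro v; rfl)
  set order := columns.foldl (fun (d : PySem.Dict String (Option Unit)) name =>
      let value := PySem.Str.strip name
      if value = "" then d else d.setdefault value none) PySem.Dict.empty with horder
  have hcont : ∀ v, order.contains v = PySem.Set.contains cs.2 v := by
    intro v
    rw [PySem.Dict.contains_eq_decide_mem_keys, hkeys]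
    by_cases h : v ∈ cs.2 <;> simp [PySem.Set.contains, h, (hmem v).symm]
  cases visible_columns with
  | none =>
    by_cases h : cs.1 = []
    · rw [if_pos h]; simp [hkeys, h]
    · rw [if_neg h]; simp [hkeys]
  | some vcs =>
    simp only
    set vo := vcs.foldl (fun (vo : List String) name =>
        let value := PySem.Str.strip name
        if PySem.Set.contains cs.2 value ∧ value ∉ vo then vo ++ [value] else vo) [] with hvo
    obtain ⟨hvnd, hvsub⟩ := vo_inv cs.2 cs.1 hmem vcs [] List.nodup_nil (by intro v hv; cases hv)
    rw [← hvo] at hvnd hvsub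
    have hrk : vcs.foldl (fun (d : PySem.Dict String Int) name =>
        let value := PySem.Str.strip name
        if order.contains value then d.setdefault value (d.size : Int) else d)
      PySem.Dict.empty = rdict vo := by
      rw [show (PySem.Dict.empty : PySem.Dict String Int) = rdict [] from rfl]
      exact rank_loop order cs.2 hcont vcs []
    have hB : (PySem.List.sorted order.keys
        (fun name => ((PySem.List.enumerate order.keys 0).foldl (fun (d : PySem.Dict String Int) p =>
            d.insert p.2 ((vcs.foldl (fun (d : PySem.Dict String Int) name =>
              let value := PySem.Str.strip name
              if order.contains value then d.setdefault value (d.size : Int) else d)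
              PySem.Dict.empty).getD p.2
              (((vcs.foldl (fun (d : PySem.Dict String Int) name =>
                let value := PySem.Str.strip name
                if order.contains value then d.setdefault value (d.size : Int) else d)
                PySem.Dict.empty).size : Int) + p.1))) PySem.Dict.empty).getD name 0) false).map
        (fun name => (name, (vcs.foldl (fun (d : PySem.Dict String Int) name =>
            let value := PySem.Str.strip name
            if order.contains value then d.setdefault value (d.size : Int) else d)
            PySem.Dict.empty).contains name))
        = (vo ++ cs.1.filter (fun name => decide (name ∉ vo))).map
          (fun name => (name, (rdict vo).contains name)) := by
      rw [hrk, hkeys, main_sorted cs.1 vo hnd hvnd hvsub]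
    rw [hB]
    by_cases h : cs.1 = []
    · rw [if_pos h]
      have hvnil : vo = [] := List.eq_nil_iff_forall_not_mem.mpr
        (fun v hv => by have := hvsub v hv; rw [h] at this; cases this)
      simp [hvnil, h]
    · rw [if_neg h]
      refine (List.map_congr_left fun n hn => ?_).symm
      have : PySem.Set.contains (PySem.Set.ofList vo) n = (rdict vo).contains n := by
        rw [rdict_contains]
        by_cases hv : n ∈ vo <;>
          simp [PySem.Set.contains, hv, PySem.Set.mem_ofList]
      rw [this]
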